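-- pv_equiv track=rewrite | github.com/luke-t-m/advent_of_code | 1_2016/1_day1_python/1.py | follow_turns
-- ===== SOURCE A (Python) =====
-- ds = [(0,1), (1,0), (0,-1), (-1, 0)]
--
-- def follow_turns(turns, run_till = None, rxy = None, rpxy = None):
--     x, y, di = 0, 0, 0
--     first_repeat = None
--     for c, v in enumerate(turns):
--         if run_till != None and c >= run_till: return
--         di = (di + (2 * int(v[0] == "L") - 1)) % 4
--         px, py = x, y
--         x, y = x + v[1] * ds[di][0], y + v[1] * ds[di][1]
--         if rpxy != None:
--             if x == px and rxy[1] == rpxy[1]: wx, wy, t1, t2 = x, rxy[1], (rxy[0], rpxy[0]), (y, py)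
--             elif y == py and rxy[0] == rpxy[0]: wx, wy, t1, t2 = rxy[0], y, (x, px), (rxy[1], rpxy[1])
--             else: continue
--             if wx >= min(t1) and wx <= max(t1) and wy >= min(t2) and wy <= max(t2): return (wx, wy)
--         elif first_repeat == None: first_repeat = follow_turns(turns, c-1, (x, y), (px, py))
--     return (abs(x) + abs(y), abs(first_repeat[0]) + abs(first_repeat[1]))
-- ===== SOURCE B (Python) =====
-- ds = [(0,1), (1,0), (0,-1), (-1, 0)]
--
-- def _cross(ox, oy, opx, opy, nx, ny, npx, npy):
--     # crossing of old segment (opx,opy)-(ox,oy) with new segment (npx,npy)-(nx,ny);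
--     # interval membership written as a sign test: min(a,b) <= w <= max(a,b)  iff  (a-w)*(b-w) <= 0
--     if ox == opx and ny == npy:
--         if (nx - ox) * (npx - ox) <= 0 and (oy - ny) * (opy - ny) <= 0:
--             return (ox, ny)
--     elif oy == opy and nx == npx:
--         if (ox - nx) * (opx - nx) <= 0 and (ny - oy) * (npy - oy) <= 0:
--             return (nx, oy)
--     return None
--
-- def follow_turns(turns, run_till = None, rxy = None, rpxy = None):
--     x, y, di = 0, 0, 0
--     first_repeat = None
--     segments = []   # endpoints of the segments walked so far, chronological
--     for c, v in enumerate(turns):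
--         if run_till is not None and c >= run_till:
--             return None
--         di = (di + (1 if v[0] == "L" else -1)) % 4
--         px, py = x, y
--         x, y = x + v[1] * ds[di][0], y + v[1] * ds[di][1]
--         if rpxy is not None:
--             hit = _cross(x, y, px, py, rxy[0], rxy[1], rpxy[0], rpxy[1])
--             if hit is not None:
--                 return hit
--         else:
--             if first_repeat is None:
--                 for s in segments[:-1]:   # skip the immediately preceding segment
--                     hit = _cross(s[0], s[1], s[2], s[3], x, y, px, py)
--                     if hit is not None:
--                         first_repeat = hit
--                         break
--             segments.append((x, y, px, py))
--     return (abs(x) + abs(y), abs(first_repeat[0]) + abs(first_repeat[1]))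
-- ===== Notes on version B (the rewrite author's own statement) =====
-- stated objective: alternative
-- what changed: A probes for the first revisited point by recursively calling itself, re-walking the whole path prefix from scratch at every step; B instead keeps one explicit list of already-walked segment endpoints, scans it (minus the immediately preceding segment) for the first crossing in the same chronological order, and writes the interval-membership test as a sign test (a-w)*(b-w)<=0 instead of min/max comparisons.
import Mathlib
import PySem

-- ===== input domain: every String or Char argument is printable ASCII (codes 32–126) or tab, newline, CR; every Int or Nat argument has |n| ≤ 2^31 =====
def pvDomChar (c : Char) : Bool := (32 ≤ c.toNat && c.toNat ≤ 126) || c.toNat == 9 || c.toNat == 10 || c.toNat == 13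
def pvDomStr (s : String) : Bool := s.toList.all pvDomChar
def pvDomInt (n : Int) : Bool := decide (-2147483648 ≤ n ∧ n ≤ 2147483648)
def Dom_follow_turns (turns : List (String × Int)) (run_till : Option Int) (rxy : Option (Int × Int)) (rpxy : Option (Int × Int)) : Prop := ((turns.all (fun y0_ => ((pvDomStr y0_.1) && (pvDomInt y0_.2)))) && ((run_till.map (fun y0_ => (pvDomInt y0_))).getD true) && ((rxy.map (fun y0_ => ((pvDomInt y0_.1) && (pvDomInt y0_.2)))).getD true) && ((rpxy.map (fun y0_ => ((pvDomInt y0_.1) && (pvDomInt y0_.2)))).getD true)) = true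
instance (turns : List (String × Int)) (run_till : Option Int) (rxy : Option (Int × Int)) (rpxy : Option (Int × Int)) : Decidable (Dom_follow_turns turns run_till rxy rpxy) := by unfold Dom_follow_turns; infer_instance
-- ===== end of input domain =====

-- B replaces A's recursive self-call per step by an explicit list of already-walked
-- segment endpoints scanned once per step, with the interval-membership test written
-- as a sign test (no re-walk of the whole prefix on every step).

-- ===== PORT A =====
def pvDs : List (Int × Int) := [(0,1), (1,0), (0,-1), (-1,0)]

-- the for-loop of A over the enumerated turns; state (x, y, di, first_repeat).
-- Where Python raises (TypeError: first_repeat/rxy is None) the port returns none;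
-- those inputs are excluded by Pre_follow_turns.
def followA_go (turns : List (String × Int)) (run_till : Option Int)
    (rxy rpxy : Option (Int × Int)) (lst : List (Int × String × Int))
    (x y di : Int) (fr : Option (Int × Int)) : Option (Int × Int) :=
  match lst with
  | [] =>
      match fr with
      | some f => some (|x| + |y|, |f.1| + |f.2|)
      | none => none          -- Python: TypeError on the final line (outside Pre_)
  | (c, v) :: rest =>
      if run_till.isSome ∧ run_till.getD 0 ≤ c then none
      else
        let di' := PySem.Int.mod (di + (2 * (if v.1 = "L" then (1:Int) else 0) - 1)) 4
        let px := x
        let py := y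
        let d := (PySem.List.pyGet? pvDs di').getD (0, 0)   -- di' ∈ [0,4): always in range
        let x' := x + v.2 * d.1
        let y' := y + v.2 * d.2
        match rpxy with
        | some rp =>
          match rxy with
          | none => none      -- Python: TypeError, rxy[1] of None (outside Pre_)
          | some r =>
            if x' = px ∧ r.2 = rp.2 then
              if min r.1 rp.1 ≤ x' ∧ x' ≤ max r.1 rp.1 ∧ min y' py ≤ r.2 ∧ r.2 ≤ max y' py
              then some (x', r.2)
              else followA_go turns run_till rxy (some rp) rest x' y' di' fr
            else if y' = py ∧ r.1 = rp.1 then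
              if min x' px ≤ r.1 ∧ r.1 ≤ max x' px ∧ min r.2 rp.2 ≤ y' ∧ y' ≤ max r.2 rp.2
              then some (r.1, y')
              else followA_go turns run_till rxy (some rp) rest x' y' di' fr
            else followA_go turns run_till rxy (some rp) rest x' y' di' fr
        | none =>
          let fr' := if fr = none
            then followA_go turns (some (c - 1)) (some (x', y')) (some (px, py))
                   (PySem.List.enumerate turns 0) 0 0 0 none
            else fr
          followA_go turns run_till rxy none rest x' y' di' fr'
  termination_by (rpxy.isNone.toNat, lst.length)
  decreasing_by
    all_goals simp only [PySem.List.length_enumerate, List.length_cons,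
      Option.isNone_none, Option.isNone_some, Bool.toNat_false, Bool.toNat_true]
    all_goals first
      | exact Prod.Lex.left _ _ (by omega)
      | exact Prod.Lex.right _ (by omega)

def follow_turns (turns : List (String × Int)) (run_till : Option Int) (rxy : Option (Int × Int)) (rpxy : Option (Int × Int)) : Option (Int × Int) :=
  followA_go turns run_till rxy rpxy (PySem.List.enumerate turns 0) 0 0 0 none

-- ===== PORT B =====
-- crossing of the old segment (opx,opy)-(ox,oy) with the new segment (npx,npy)-(nx,ny);
-- interval membership written as a sign test: min a b ≤ w ≤ max a b  iff  (a-w)*(b-w) ≤ 0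
def crossSeg (ox oy opx opy nx ny npx npy : Int) : Option (Int × Int) :=
  if ox = opx ∧ ny = npy then
    if (nx - ox) * (npx - ox) ≤ 0 ∧ (oy - ny) * (opy - ny) ≤ 0 then some (ox, ny) else none
  else if oy = opy ∧ nx = npx then
    if (ox - nx) * (opx - nx) ≤ 0 ∧ (ny - oy) * (npy - oy) ≤ 0 then some (nx, oy) else none
  else none

-- B's inner for-loop over the stored segments (first hit wins)
def findHit : List (Int × Int × Int × Int) → Int → Int → Int → Int → Option (Int × Int)
  | [], _, _, _, _ => none
  | (ox, oy, opx, opy) :: rest, nx, ny, npx, npy =>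
    match crossSeg ox oy opx opy nx ny npx npy with
    | some w => some w
    | none => findHit rest nx ny npx npy

-- the for-loop of B; state (x, y, di, first_repeat, segments)
def followB_go (run_till : Option Int) (rxy rpxy : Option (Int × Int))
    (lst : List (Int × String × Int)) (x y di : Int)
    (fr : Option (Int × Int)) (segs : List (Int × Int × Int × Int)) : Option (Int × Int) :=
  match lst with
  | [] =>
      match fr with
      | some f => some (|x| + |y|, |f.1| + |f.2|)
      | none => none          -- Python: TypeError on the final line (outside Pre_)
  | (c, v) :: rest =>
      if run_till.isSome ∧ run_till.getD 0 ≤ c then none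
      else
        let di' := PySem.Int.mod (di + (if v.1 = "L" then (1:Int) else -1)) 4
        let px := x
        let py := y
        let d := (PySem.List.pyGet? pvDs di').getD (0, 0)   -- di' ∈ [0,4): always in range
        let x' := x + v.2 * d.1
        let y' := y + v.2 * d.2
        match rpxy with
        | some rp =>
          match rxy with
          | none => none      -- Python: TypeError inside _cross (outside Pre_)
          | some r =>
            match crossSeg x' y' px py r.1 r.2 rp.1 rp.2 with
            | some w => some w
            | none => followB_go run_till rxy rpxy rest x' y' di' fr segs
        | none =>
          let fr' := if fr = none
            then findHit (PySem.List.slice segs none (some (-1))) x' y' px py   -- segments[:-1]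
            else fr
          followB_go run_till rxy rpxy rest x' y' di' fr' (segs ++ [(x', y', px, py)])

def follow_turns_alt (turns : List (String × Int)) (run_till : Option Int) (rxy : Option (Int × Int)) (rpxy : Option (Int × Int)) : Option (Int × Int) :=
  followB_go run_till rxy rpxy (PySem.List.enumerate turns 0) 0 0 0 none []

-- ===== PRECONDITION & SPEC =====
-- spec-side definitions for Pre_ (independent of both ports): the c-th segment of the
-- walked path, given by prefix sums (direction = running turn total mod 4)
def pvDirs : List (Int × Int) := [(0,1), (1,0), (0,-1), (-1,0)]

def pvTurn (v : String × Int) : Int := if v.1 = "L" then 1 else -1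

def pvDir (turns : List (String × Int)) (c : Nat) : Int :=
  PySem.Int.mod ((turns.take (c + 1)).map pvTurn).sum 4

def pvDelta (turns : List (String × Int)) (c : Nat) : Int × Int :=
  let d := (PySem.List.pyGet? pvDirs (pvDir turns c)).getD (0, 0)
  ((turns.getD c ("", 0)).2 * d.1, (turns.getD c ("", 0)).2 * d.2)

def pvPos (turns : List (String × Int)) (c : Nat) : Int × Int :=
  (((List.range c).map (fun k => (pvDelta turns k).1)).sum,
   ((List.range c).map (fun k => (pvDelta turns k).2)).sum)

def pvSeg (turns : List (String × Int)) (c : Nat) : Int × Int × Int × Int :=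
  ((pvPos turns (c + 1)).1, (pvPos turns (c + 1)).2, (pvPos turns c).1, (pvPos turns c).2)

def pvHit : Int × Int × Int × Int → Int × Int × Int × Int → Bool :=
  fun s n =>
    match s, n with
    | (ox, oy, opx, opy), (nx, ny, npx, npy) =>
      if ox = opx ∧ ny = npy then
        decide ((nx - ox) * (npx - ox) ≤ 0 ∧ (oy - ny) * (opy - ny) ≤ 0)
      else if oy = opy ∧ nx = npx then
        decide ((ox - nx) * (opx - nx) ≤ 0 ∧ (ny - oy) * (npy - oy) ≤ 0)
      else false

-- Pre_ = exactly the inputs on which the Python A returns (no TypeError):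
-- the turn list is nonempty, and either the loop is cut short by run_till before its end,
-- or a crossing exists (of the walked path with the given rxy-rpxy segment when rpxy is
-- given — then rxy must be given too unless run_till stops the loop at once — and of the
-- walked path with its own earlier, non-adjacent segments when rpxy is None).
def Pre_follow_turns (turns : List (String × Int)) (run_till : Option Int) (rxy : Option (Int × Int)) (rpxy : Option (Int × Int)) : Prop :=
  turns ≠ [] ∧
  ((match rpxy with
    | some rp =>
      match rxy with
      | none => run_till.any (fun rt => decide (rt ≤ 0))
      | some r =>
        run_till.any (fun rt => decide (rt < (turns.length : Int))) ||
          (List.range turns.length).any (fun c => pvHit (pvSeg turns c) (r.1, r.2, rp.1, rp.2))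
    | none =>
      run_till.any (fun rt => decide (rt < (turns.length : Int))) ||
        (List.range turns.length).any (fun c =>
          (List.range (c - 1)).any (fun e => pvHit (pvSeg turns e) (pvSeg turns c)))) = true)

instance (turns : List (String × Int)) (run_till : Option Int) (rxy : Option (Int × Int)) (rpxy : Option (Int × Int)) : Decidable (Pre_follow_turns turns run_till rxy rpxy) := by
  unfold Pre_follow_turns; infer_instance

def pvWitness_follow_turns : (List (String × Int)) × Option Int × (Option (Int × Int)) × (Option (Int × Int)) :=
  ([("R", 8), ("R", 4), ("R", 4), ("R", 8)], none, none, none)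

def Spec_follow_turns (turns : List (String × Int)) (run_till : Option Int) (rxy : Option (Int × Int)) (rpxy : Option (Int × Int)) (out : Option (Int × Int)) : Prop := out = follow_turns_alt turns run_till rxy rpxy
instance (turns : List (String × Int)) (run_till : Option Int) (rxy : Option (Int × Int)) (rpxy : Option (Int × Int)) (out : Option (Int × Int)) : Decidable (Spec_follow_turns turns run_till rxy rpxy out) := by unfold Spec_follow_turns; infer_instance

-- ===== CLAIM (what is proved, stated in full; the proofs are below) =====
def Claim_equal_follow_turns : Prop := ∀ (turns : List (String × Int)) (run_till : Option Int) (rxy : Option (Int × Int)) (rpxy : Option (Int × Int)), Dom_follow_turns turns run_till rxy rpxy → Pre_follow_turns turns run_till rxy rpxy → Spec_follow_turns turns run_till rxy rpxy (follow_turns turns run_till rxy rpxy)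

-- ===== LEMMAS AND PROOFS =====

theorem prodle (a b w : Int) : ((a - w) * (b - w) ≤ 0) ↔ (min a b ≤ w ∧ w ≤ max a b) := by
  rw [mul_nonpos_iff]; omega

theorem crossA_eq (x y px py r1 r2 rp1 rp2 : Int) (k : Option (Int × Int)) :
    (if x = px ∧ r2 = rp2 then
       if min r1 rp1 ≤ x ∧ x ≤ max r1 rp1 ∧ min y py ≤ r2 ∧ r2 ≤ max y py then some (x, r2) else k
     else if y = py ∧ r1 = rp1 then
       if min x px ≤ r1 ∧ r1 ≤ max x px ∧ min r2 rp2 ≤ y ∧ y ≤ max r2 rp2 then some (r1, y) else k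
     else k)
    = (match crossSeg x y px py r1 r2 rp1 rp2 with | some w => some w | none => k) := by
  unfold crossSeg
  simp only [prodle]
  split_ifs <;> first | rfl | omega

theorem diStep (p : Prop) [Decidable p] : 2 * (if p then (1:Int) else 0) - 1 = if p then 1 else -1 := by
  split <;> norm_num

theorem someMode (turns : List (String × Int)) (run_till : Option Int) (rxy : Option (Int × Int)) (rp : Int × Int) :
    ∀ (lst : List (Int × String × Int)) (x y di : Int) (fr : Option (Int × Int)) (segs : List (Int × Int × Int × Int)),
    followA_go turns run_till rxy (some rp) lst x y di fr
      = followB_go run_till rxy (some rp) lst x y di fr segs := by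
  intro lst
  induction lst with
  | nil => intro x y di fr segs; rw [followA_go.eq_def, followB_go.eq_def]
  | cons cv rest ih =>
    intro x y di fr segs
    obtain ⟨c, v⟩ := cv
    rw [followA_go, followB_go]
    simp only [diStep]
    by_cases hg : run_till.isSome ∧ run_till.getD 0 ≤ c
    · simp [hg]
    · simp only [if_neg hg]
      cases rxy with
      | none => rfl
      | some r =>
        simp only
        rw [crossA_eq]
        cases crossSeg (x + v.2 * ((PySem.List.pyGet? pvDs (PySem.Int.mod (di + if v.1 = "L" then 1 else -1) 4)).getD (0,0)).1)
            (y + v.2 * ((PySem.List.pyGet? pvDs (PySem.Int.mod (di + if v.1 = "L" then 1 else -1) 4)).getD (0,0)).2)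
            x y r.1 r.2 rp.1 rp.2 with
        | some w => simp
        | none => simp only []; exact ih _ _ _ _ segs

def pvSegsGo : List (String × Int) → Int → Int → Int → List (Int × Int × Int × Int)
  | [], _, _, _ => []
  | v :: rest, x, y, di =>
    let di' := PySem.Int.mod (di + (if v.1 = "L" then (1:Int) else -1)) 4
    let d := (PySem.List.pyGet? pvDirs di').getD (0, 0)
    let x' := x + v.2 * d.1
    let y' := y + v.2 * d.2
    (x', y', x, y) :: pvSegsGo rest x' y' di'

theorem pvDirs_eq : pvDirs = pvDs := rfl

def pvWalk : List (String × Int) → Int × Int × Int → Int × Int × Int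
  | [], s => s
  | v :: rest, (x, y, di) =>
    let di' := PySem.Int.mod (di + (if v.1 = "L" then (1:Int) else -1)) 4
    let d := (PySem.List.pyGet? pvDirs di').getD (0, 0)
    pvWalk rest (x + v.2 * d.1, y + v.2 * d.2, di')

theorem pvWalk_append (p q : List (String × Int)) : ∀ s, pvWalk (p ++ q) s = pvWalk q (pvWalk p s) := by
  induction p with
  | nil => intro s; rfl
  | cons v rest ih => intro ⟨x, y, di⟩; simp [pvWalk, ih]

theorem segsGo_append (p q : List (String × Int)) : ∀ x y di,
    pvSegsGo (p ++ q) x y di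
      = pvSegsGo p x y di ++ pvSegsGo q (pvWalk p (x, y, di)).1 (pvWalk p (x, y, di)).2.1 (pvWalk p (x, y, di)).2.2 := by
  induction p with
  | nil => intro x y di; rfl
  | cons v rest ih => intro x y di; simp [pvSegsGo, pvWalk, ih]

theorem length_segsGo (p : List (String × Int)) : ∀ x y di, (pvSegsGo p x y di).length = p.length := by
  induction p with
  | nil => intro x y di; rfl
  | cons v rest ih => intro x y di; simp [pvSegsGo, ih]

theorem innerRun (turns : List (String × Int)) (rv rp : Int × Int) (r : Int) :
    ∀ (ts : List (String × Int)) (c0 x y di : Int),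
    followA_go turns (some r) (some rv) (some rp) (PySem.List.enumerate ts c0) x y di none
      = findHit ((pvSegsGo ts x y di).take (r - c0).toNat) rv.1 rv.2 rp.1 rp.2 := by
  intro ts
  induction ts with
  | nil => intro c0 x y di; rw [followA_go.eq_def]; simp [PySem.List.enumerate, findHit, pvSegsGo]
  | cons v rest ih =>
    intro c0 x y di
    rw [PySem.List.enumerate_cons, followA_go.eq_def]
    by_cases hg : r ≤ c0
    · have h0 : (r - c0).toNat = 0 := by omega
      simp [hg, h0, findHit]
    · have h1 : (r - c0).toNat = (r - (c0 + 1)).toNat + 1 := by omega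
      simp only [Option.isSome_some, Option.getD_some, true_and, if_neg hg, diStep, pvSegsGo,
        pvDirs_eq, h1, List.take_succ_cons, findHit]
      rw [crossA_eq]
      cases crossSeg (x + v.2 * ((PySem.List.pyGet? pvDs (PySem.Int.mod (di + if v.1 = "L" then 1 else -1) 4)).getD (0,0)).1)
          (y + v.2 * ((PySem.List.pyGet? pvDs (PySem.Int.mod (di + if v.1 = "L" then 1 else -1) 4)).getD (0,0)).2)
          x y rv.1 rv.2 rp.1 rp.2 with
      | some w => simp
      | none => simp only []; exact ih (c0 + 1) _ _ _

theorem dropLast_take (S : List (Int × Int × Int × Int)) : S.take (S.length - 1) = S.dropLast := by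
  rw [List.dropLast_eq_take]

theorem noneMode (rt : Option Int) (rxy : Option (Int × Int)) :
    ∀ (ts p : List (String × Int)) (x y di : Int) (fr : Option (Int × Int)),
    pvWalk p (0, 0, 0) = (x, y, di) →
    followA_go (p ++ ts) rt rxy none (PySem.List.enumerate ts (p.length : Int)) x y di fr
      = followB_go rt rxy none (PySem.List.enumerate ts (p.length : Int)) x y di fr (pvSegsGo p 0 0 0) := by
  intro ts
  induction ts with
  | nil =>
    intro p x y di fr hw
    rw [followA_go.eq_def, followB_go.eq_def]
    simp [PySem.List.enumerate]
  | cons v rest ih =>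
    intro p x y di fr hw
    rw [PySem.List.enumerate_cons, followA_go.eq_def, followB_go.eq_def]
    by_cases hg : rt.isSome ∧ rt.getD 0 ≤ (p.length : Int)
    · simp [hg]
    · simp only [if_neg hg, diStep]
      -- the two step states coincide
      set di' := PySem.Int.mod (di + if v.1 = "L" then 1 else -1) 4 with hdi
      set X := x + v.2 * ((PySem.List.pyGet? pvDs di').getD (0, 0)).1 with hX
      set Y := y + v.2 * ((PySem.List.pyGet? pvDs di').getD (0, 0)).2 with hY
      -- A's recursive probe equals B's scan of the stored segments
      have hseg : pvSegsGo (p ++ v :: rest) 0 0 0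
          = pvSegsGo p 0 0 0 ++ ((X, Y, x, y) :: pvSegsGo rest X Y di') := by
        rw [segsGo_append, hw]
        simp [pvSegsGo, pvDirs_eq, hX, hY, hdi]
      have hinner : followA_go (p ++ v :: rest) (some ((p.length : Int) - 1)) (some (X, Y)) (some (x, y))
            (PySem.List.enumerate (p ++ v :: rest) 0) 0 0 0 none
          = findHit (PySem.List.slice (pvSegsGo p 0 0 0) none (some (-1))) X Y x y := by
        rw [innerRun, hseg, PySem.List.slice_to_neg_one]
        have hlen : ((p.length : Int) - 1 - 0).toNat = (pvSegsGo p 0 0 0).length - 1 := by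
          rw [length_segsGo]; omega
        rw [hlen, List.take_append_of_le_length (by omega), dropLast_take]
      rw [hinner]
      -- both loops continue with the same state; apply the IH at p ++ [v]
      have hw' : pvWalk (p ++ [v]) (0, 0, 0) = (X, Y, di') := by
        rw [pvWalk_append, hw]; simp [pvWalk, pvDirs_eq, hX, hY, hdi]
      have := ih (p ++ [v]) X Y di'
        (if fr = none then findHit (PySem.List.slice (pvSegsGo p 0 0 0) none (some (-1))) X Y x y else fr) hw'
      simp only [List.append_assoc, List.singleton_append, List.length_append, List.length_singleton,
        Nat.cast_add, Nat.cast_one] at this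
      rw [this]
      have hsnoc : pvSegsGo (p ++ [v]) 0 0 0 = pvSegsGo p 0 0 0 ++ [(X, Y, x, y)] := by
        rw [segsGo_append, hw]; simp [pvSegsGo, pvDirs_eq, hX, hY, hdi]
      rw [hsnoc]

theorem ports_eq (turns : List (String × Int)) (run_till : Option Int) (rxy : Option (Int × Int)) (rpxy : Option (Int × Int)) :
    follow_turns turns run_till rxy rpxy = follow_turns_alt turns run_till rxy rpxy := by
  cases rpxy with
  | some rp =>
    unfold follow_turns follow_turns_alt
    exact someMode turns run_till rxy rp _ 0 0 0 none []
  | none =>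
    unfold follow_turns follow_turns_alt
    have h := noneMode run_till rxy turns [] 0 0 0 none rfl
    simpa [pvSegsGo] using h

-- ===== VERDICT (by name: the statement is the Claim_ definition above) =====
theorem follow_turns_spec : Claim_equal_follow_turns := by
  intro turns run_till rxy rpxy _ _
  unfold Spec_follow_turns
  exact ports_eq turns run_till rxy rpxy
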